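-- pv_equiv track=rewrite | github.com/JayPrakash916/IMDB-Scraper | task11.py | analysis_movies_genre
-- ===== SOURCE A (Python) =====
-- def analysis_movies_genre(movie_list):
-- 	dict2={}
-- 	for i in movie_list:
-- 		for genre in i["genre"]:
-- 			if genre not in dict2:
-- 				dict2[genre]=1
-- 			else:
-- 				 dict2[genre]+=1
-- 	return dict2
-- ===== SOURCE B (Python) =====
-- def analysis_movies_genre(movie_list):
-- 	flat = [genre for movie in movie_list for genre in movie["genre"]]
-- 	return {genre: flat.count(genre) for genre in dict.fromkeys(flat)}
-- ===== Notes on version B (the rewrite author's own statement) =====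
-- stated objective: simpler
-- what changed: Replaces the nested loops with branching hash accumulation by flattening all genres into one list, deduplicating it in first-occurrence order, and counting each distinct genre with list.count in a dict comprehension.
import Mathlib
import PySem

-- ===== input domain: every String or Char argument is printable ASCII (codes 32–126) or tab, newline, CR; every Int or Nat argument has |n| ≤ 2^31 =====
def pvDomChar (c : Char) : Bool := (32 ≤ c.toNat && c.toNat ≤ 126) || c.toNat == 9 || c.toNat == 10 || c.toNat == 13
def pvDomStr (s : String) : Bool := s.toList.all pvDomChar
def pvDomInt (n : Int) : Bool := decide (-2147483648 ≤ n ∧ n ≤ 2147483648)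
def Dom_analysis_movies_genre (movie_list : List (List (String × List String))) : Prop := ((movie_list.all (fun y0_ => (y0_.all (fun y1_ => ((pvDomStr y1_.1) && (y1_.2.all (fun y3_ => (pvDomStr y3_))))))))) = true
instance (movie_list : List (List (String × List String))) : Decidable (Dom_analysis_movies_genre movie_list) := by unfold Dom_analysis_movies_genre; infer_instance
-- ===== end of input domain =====

-- B replaces the nested hash-accumulation loops by flatten + ordered dedup + per-genre list.count (simpler, not faster).

-- ===== PORT A =====
-- literal port of A: a dict accumulator, 'if genre not in dict2: dict2[genre]=1 else: dict2[genre]+=1'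
def analysis_movies_genre (movie_list : List (List (String × List String))) : List (String × Int) :=
  (movie_list.foldl
    (fun dict2 i =>
      ((((PySem.Dict.mk i).get? "genre").getD []).foldl
        (fun dict2 genre =>
          if !(dict2.contains genre) then dict2.insert genre 1
          else dict2.insert genre (dict2.getD genre 0 + 1))
        dict2))
    PySem.Dict.empty).items

-- ===== PORT B =====
-- literal port of Source B: flatten all genres, dedup in first-occurrence order, count each with list.count
def analysis_movies_genre_alt (movie_list : List (List (String × List String))) : List (String × Int) :=
  let flat := movie_list.flatMap (fun movie => (((PySem.Dict.mk movie).get? "genre").getD []))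
  (PySem.List.dedup flat).map (fun genre => (genre, PySem.List.count flat genre))

-- ===== PRECONDITION & SPEC =====
-- Pre_ excludes exactly the inputs where some movie dict lacks the key "genre": there Python A (and B) raises KeyError.
def Pre_analysis_movies_genre (movie_list : List (List (String × List String))) : Prop :=
  ∀ m ∈ movie_list, "genre" ∈ m.map Prod.fst
instance (movie_list : List (List (String × List String))) : Decidable (Pre_analysis_movies_genre movie_list) := by unfold Pre_analysis_movies_genre; infer_instance
def pvWitness_analysis_movies_genre : (List (List (String × List String))) :=
  [[("genre", ["Drama", "Comedy"])], [("genre", ["Drama"])]]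
def Spec_analysis_movies_genre (movie_list : List (List (String × List String))) (out : List (String × Int)) : Prop := out = analysis_movies_genre_alt movie_list
instance (movie_list : List (List (String × List String))) (out : List (String × Int)) : Decidable (Spec_analysis_movies_genre movie_list out) := by unfold Spec_analysis_movies_genre; infer_instance

-- ===== CLAIM (what is proved, stated in full; the proofs are below) =====
def Claim_equal_analysis_movies_genre : Prop := ∀ (movie_list : List (List (String × List String))), Dom_analysis_movies_genre movie_list → Pre_analysis_movies_genre movie_list → Spec_analysis_movies_genre movie_list (analysis_movies_genre movie_list)

-- ===== LEMMAS AND PROOFS =====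

-- A's loop body is exactly the counting-insert step: when the key is absent, getD is 0, so insert 1 = insert (0+1)
lemma stepA_eq (d : PySem.Dict String Int) (g : String) :
    (if !(d.contains g) then d.insert g 1 else d.insert g (d.getD g 0 + 1))
      = d.insert g (d.getD g 0 + 1) := by
  by_cases h : d.contains g = true
  · simp [h]
  · simp only [Bool.not_eq_true] at h
    simp [h, PySem.Dict.getD_of_not_contains (h := h)]

-- the nested movie/genre loops fold the same step over the flattened genre list
lemma nested_foldl_eq_flat (movie_list : List (List (String × List String)))
    (f : PySem.Dict String Int → String → PySem.Dict String Int) (init : PySem.Dict String Int) :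
    movie_list.foldl
      (fun d i => ((((PySem.Dict.mk i).get? "genre").getD []).foldl f d)) init
    = (movie_list.flatMap (fun movie => (((PySem.Dict.mk movie).get? "genre").getD []))).foldl f init := by
  induction movie_list generalizing init with
  | nil => rfl
  | cons m t ih => simp [List.foldl_cons, List.flatMap_cons, List.foldl_append, ih]

theorem analysis_movies_genre_spec : Claim_equal_analysis_movies_genre := by
  intro movie_list _ _
  unfold Spec_analysis_movies_genre analysis_movies_genre analysis_movies_genre_alt
  have hstep : (fun (d : PySem.Dict String Int) (g : String) =>
      if !(d.contains g) then d.insert g 1 else d.insert g (d.getD g 0 + 1))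
      = fun d g => d.insert g (d.getD g 0 + 1) := by
    funext d g; exact stepA_eq d g
  rw [hstep, nested_foldl_eq_flat, PySem.Dict.foldl_insert_getD_add_one_eq_counter,
    PySem.Dict.items_counter]
  simp [PySem.List.dedup_eq_ofList, PySem.List.count_eq]
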